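-- pv_equiv track=rewrite | github.com/chae1park/codingtest | etc/할인_행사.py | solution
-- ===== SOURCE A (Python) =====
-- from collections import Counter
--
-- def solution(want, number, discount):
--     answer = 0
--     d = 10
--     want_dict = { want[i]:number[i] for i in range(len(want))}
--
--     for i in range(len(discount)-d+1):
--         isSatisfied = True
--         cntr = Counter(discount[i:i+d])
--         for item, quantity in want_dict.items():
--             if cntr[item] < quantity:
--                 isSatisfied = False
--                 break
--         answer += int(isSatisfied)
--
--     return answer
-- ===== SOURCE B (Python) =====
-- def solution(want, number, discount):
--     req = dict(zip(want, number))
--     n = len(discount)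
--     if n < 10:
--         return 0
--     pref = {}
--     for item in req:
--         p = [0]
--         c = 0
--         for x in discount:
--             if x == item:
--                 c += 1
--             p.append(c)
--         pref[item] = p
--     ans = 0
--     for i in range(n - 9):
--         if all(pref[item][i + 10] - pref[item][i] >= q for item, q in req.items()):
--             ans += 1
--     return ans
-- ===== Notes on version B (the rewrite author's own statement) =====
-- stated objective: alternative
-- what changed: Instead of building a fresh Counter for every length-10 window, B precomputes one prefix-count array per wanted item and tests each window with O(1) prefix differences per item.
import Mathlib
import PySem

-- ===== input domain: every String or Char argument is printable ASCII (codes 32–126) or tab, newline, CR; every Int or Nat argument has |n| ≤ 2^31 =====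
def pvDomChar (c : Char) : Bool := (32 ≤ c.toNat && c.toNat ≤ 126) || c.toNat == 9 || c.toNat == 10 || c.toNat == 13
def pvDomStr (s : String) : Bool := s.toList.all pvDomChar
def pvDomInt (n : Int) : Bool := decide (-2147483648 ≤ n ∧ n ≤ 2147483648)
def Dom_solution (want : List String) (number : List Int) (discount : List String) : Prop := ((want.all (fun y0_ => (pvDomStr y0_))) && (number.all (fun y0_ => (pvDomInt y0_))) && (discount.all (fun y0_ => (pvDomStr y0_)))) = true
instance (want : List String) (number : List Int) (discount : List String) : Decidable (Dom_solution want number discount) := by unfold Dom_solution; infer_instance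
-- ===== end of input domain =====

-- B replaces A's per-window Counter rebuild by per-item prefix-count arrays; equal on Pre_ (A raises IndexError outside it).

-- ===== PORT A =====
-- inner 'for item, quantity in want_dict.items(): if cntr[item] < quantity: break'
def checkA (cntr : PySem.Dict String Int) : List (String × Int) → Bool
  | [] => true
  | (item, quantity) :: rest =>
      if cntr.getD item 0 < quantity then false else checkA cntr rest

def solution (want : List String) (number : List Int) (discount : List String) : Int :=
  let d : Int := 10
  let wantDict : PySem.Dict String Int :=
    (PySem.List.pyRange 0 (PySem.List.len want) 1).foldl
      (fun dd i => dd.insert (PySem.List.pyGetD want i "") (PySem.List.pyGetD number i 0))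
      PySem.Dict.empty
  (PySem.List.pyRange 0 (PySem.List.len discount - d + 1) 1).foldl
    (fun answer i =>
      let cntr := PySem.Dict.counter (PySem.List.slice discount (some i) (some (i + d)))
      let isSatisfied := checkA cntr wantDict.items
      answer + (if isSatisfied then (1 : Int) else 0))
    0

-- ===== PORT B =====
-- 'p = [0]; c = 0; for x in discount: c += (x == item); p.append(c)'
def prefCounts (item : String) (discount : List String) : List Int :=
  (discount.foldl
    (fun (st : List Int × Int) x =>
      let c := if x == item then st.2 + 1 else st.2
      (st.1 ++ [c], c))
    ([0], 0)).1

def solution_alt (want : List String) (number : List Int) (discount : List String) : Int :=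
  let req : PySem.Dict String Int :=
    (want.zip number).foldl (fun dd p => dd.insert p.1 p.2) PySem.Dict.empty
  let n : Int := PySem.List.len discount
  if n < 10 then 0
  else
    let pref : PySem.Dict String (List Int) :=
      req.keys.foldl (fun dd item => dd.insert item (prefCounts item discount)) PySem.Dict.empty
    (PySem.List.pyRange 0 (n - 9) 1).foldl
      (fun ans i =>
        if req.items.all (fun p =>
            PySem.List.pyGetD ((pref.get? p.1).getD []) (i + 10) 0
              - PySem.List.pyGetD ((pref.get? p.1).getD []) i 0 ≥ p.2)
        then ans + 1 else ans)
      0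

-- ===== PRECONDITION & SPEC =====
-- Pre_ excludes exactly the inputs where A raises IndexError (number shorter than want).
def Pre_solution (want : List String) (number : List Int) (discount : List String) : Prop :=
  want.length ≤ number.length
instance (want : List String) (number : List Int) (discount : List String) : Decidable (Pre_solution want number discount) := by unfold Pre_solution; infer_instance

def pvWitness_solution : List String × List Int × List String :=
  (["a"], [1], ["a", "b", "a", "a", "a", "a", "a", "a", "a", "a"])

def Spec_solution (want : List String) (number : List Int) (discount : List String) (out : Int) : Prop := out = solution_alt want number discount
instance (want : List String) (number : List Int) (discount : List String) (out : Int) : Decidable (Spec_solution want number discount out) := by unfold Spec_solution; infer_instance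

-- ===== CLAIM (what is proved, stated in full; the proofs are below) =====
def Claim_equal_solution : Prop := ∀ (want : List String) (number : List Int) (discount : List String), Dom_solution want number discount → Pre_solution want number discount → Spec_solution want number discount (solution want number discount)

-- ===== LEMMAS AND PROOFS =====

theorem checkA_eq_all (cntr : PySem.Dict String Int) (pairs : List (String × Int)) :
    checkA cntr pairs = pairs.all (fun p => decide (p.2 ≤ cntr.getD p.1 0)) := by
  induction pairs with
  | nil => rfl
  | cons p rest ih =>
      obtain ⟨item, q⟩ := p
      simp only [checkA, List.all_cons, ih]
      by_cases h : cntr.getD item 0 < q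
      · have h2 : ¬ q ≤ cntr.getD item 0 := by omega
        simp [h, h2]
      · have h2 : q ≤ cntr.getD item 0 := by omega
        simp [h, h2]

theorem zip_eq_map_range (want : List String) (number : List Int)
    (h : want.length ≤ number.length) :
    (List.range want.length).map (fun k => (want.getD k "", number.getD k 0)) = want.zip number := by
  apply List.ext_getElem
  · simp; omega
  · intro k h1 h2
    have hk : k < want.length := by simpa using h1
    have hk2 : k < number.length := by omega
    simp [List.getD_eq_getElem?_getD, hk, hk2]

theorem dictA_eq_req (want : List String) (number : List Int)
    (h : want.length ≤ number.length) :
    (PySem.List.pyRange 0 (PySem.List.len want) 1).foldl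
      (fun dd i => dd.insert (PySem.List.pyGetD want i "") (PySem.List.pyGetD number i 0))
      PySem.Dict.empty
    = (want.zip number).foldl (fun dd p => dd.insert p.1 p.2) PySem.Dict.empty := by
  rw [← zip_eq_map_range want number h, List.foldl_map, PySem.List.pyRange_one, List.foldl_map]
  simp only [PySem.List.len_eq, Int.sub_zero, Int.toNat_natCast]
  apply PySem.List.foldl_congr_mem
  intro acc k hk
  simp

theorem prefAux (item : String) (l : List String) : ∀ (p : List Int) (c : Int),
    (l.foldl (fun (st : List Int × Int) x =>
        let c' := if x == item then st.2 + 1 else st.2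
        (st.1 ++ [c'], c')) (p, c)).1
    = p ++ (List.range l.length).map (fun k => c + (((l.take (k+1)).count item : Nat) : Int)) := by
  induction l with
  | nil => intro p c; simp
  | cons x l ih =>
      intro p c
      simp only [List.foldl_cons]
      rw [ih]
      simp only [List.length_cons, List.range_succ_eq_map, List.map_cons, List.map_map,
        List.append_assoc, List.singleton_append]
      congr 1
      congr 1
      · show (if x == item then c + 1 else c) = c + (((x :: l).take 1).count item : Int)
        by_cases hx : x = item
        · simp [hx]
        · have hx' : ¬ item = x := fun e => hx e.symm
          simp [hx, hx']
      · apply List.map_congr_left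
        intro k _
        show (if x == item then c + 1 else c) + ((l.take (k+1)).count item : Int)
            = c + (((x :: l).take (k+1+1)).count item : Int)
        have ht : (x :: l).take (k + 1 + 1) = x :: l.take (k + 1) := rfl
        rw [ht, List.count_cons]
        by_cases hx : x = item
        · simp only [hx, BEq.rfl, if_pos, beq_self_eq_true, if_true]
          push_cast; ring
        · have hx' : ¬ item = x := fun e => hx e.symm
          simp [hx, hx']

theorem prefCounts_eq (item : String) (l : List String) :
    prefCounts item l
    = (List.range (l.length + 1)).map (fun k => (((l.take k).count item : Nat) : Int)) := by
  unfold prefCounts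
  rw [prefAux]
  rw [List.range_succ_eq_map, List.map_cons, List.map_map]
  simp [Function.comp_def]

theorem pref_get? (K : List String) (discount : List String) (hK : K.Nodup)
    (item : String) (hmem : item ∈ K) :
    ((K.foldl (fun dd it => dd.insert it (prefCounts it discount)) PySem.Dict.empty).get? item)
      = some (prefCounts item discount) := by
  have hitems := PySem.Dict.items_foldl_insert_fresh K (fun a => a)
    (fun a => prefCounts a discount) PySem.Dict.empty
    (by intro a _; simp [PySem.Dict.contains_empty]) (by simpa using hK)
  apply PySem.Dict.get?_of_mem_items
  · rw [hitems]
    simp only [PySem.Dict.items, PySem.Dict.empty, List.nil_append]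
    exact List.mem_map.mpr ⟨item, hmem, rfl⟩
  · exact PySem.Dict.nodup_keys_foldl_insert K _ _ (by simp [PySem.Dict.nodup_keys_empty])

theorem pyGetD_prefCounts (item : String) (l : List String) (k : Nat) (hk : k ≤ l.length) :
    PySem.List.pyGetD (prefCounts item l) (k : Int) 0 = (((l.take k).count item : Nat) : Int) := by
  rw [prefCounts_eq]
  rw [PySem.List.pyGetD_natCast]
  rw [List.getD_eq_getElem?_getD]
  rw [List.getElem?_map]
  simp [List.getElem?_range (by omega : k < l.length + 1)]

theorem count_slice (item : String) (l : List String) (i : Int)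
    (h0 : 0 ≤ i) (h1 : i + 10 ≤ (l.length : Int)) :
    ((PySem.List.slice l (some i) (some (i + 10))).count item : Int)
      = (((l.take (i + 10).toNat).count item : Nat) : Int)
        - (((l.take i.toNat).count item : Nat) : Int) := by
  rw [PySem.List.slice_toNat l h0 (by omega)]
  have ht : (i + 10).toNat = i.toNat + 10 := by omega
  have hsub : (i + 10).toNat - i.toNat = 10 := by omega
  rw [ht, show i.toNat + 10 - i.toNat = 10 from by omega, List.take_add, List.count_append]
  push_cast
  ring

theorem all_congr_mem {α : Type} (l : List α) (p q : α → Bool)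
    (h : ∀ x ∈ l, p x = q x) : l.all p = l.all q := by
  induction l with
  | nil => rfl
  | cons x l ih =>
      simp only [List.all_cons]
      rw [h x (by simp), ih (fun y hy => h y (by simp [hy]))]

theorem solution_eq_alt (want : List String) (number : List Int) (discount : List String)
    (h : want.length ≤ number.length) :
    solution want number discount = solution_alt want number discount := by
  simp only [solution, solution_alt]
  rw [dictA_eq_req want number h]
  set req := (want.zip number).foldl (fun dd p => dd.insert p.1 p.2) PySem.Dict.empty with hreq
  by_cases hn : (PySem.List.len discount : Int) < 10
  · rw [if_pos hn]
    rw [PySem.List.pyRange_one_eq_nil (by simp only [PySem.List.len_eq] at hn ⊢; omega)]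
    rfl
  · rw [if_neg hn]
    simp only [PySem.List.len_eq] at hn ⊢
    rw [show (discount.length : Int) - 10 + 1 = (discount.length : Int) - 9 from by ring]
    have hkeys : req.keys.Nodup :=
      PySem.Dict.nodup_keys_foldl_insert_key (want.zip number) (fun p => p.1) (fun _ p => p.2)
        PySem.Dict.empty (by simp [PySem.Dict.nodup_keys_empty])
    apply PySem.List.foldl_congr_mem
    intro acc i hi
    obtain ⟨hi0, hi1⟩ := PySem.List.mem_pyRange_one.mp hi
    have hbody : checkA (PySem.Dict.counter (PySem.List.slice discount (some i) (some (i + 10)))) req.items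
        = req.items.all (fun p =>
            decide (PySem.List.pyGetD
                (((req.keys.foldl (fun dd it => dd.insert it (prefCounts it discount))
                    PySem.Dict.empty).get? p.1).getD []) (i + 10) 0
              - PySem.List.pyGetD
                (((req.keys.foldl (fun dd it => dd.insert it (prefCounts it discount))
                    PySem.Dict.empty).get? p.1).getD []) i 0 ≥ p.2)) := by
      rw [checkA_eq_all]
      apply all_congr_mem
      intro p hp
      have hk : p.1 ∈ req.keys := PySem.Dict.mem_keys_of_mem_items req hp
      rw [pref_get? req.keys discount hkeys p.1 hk]
      simp only [Option.getD_some]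
      rw [PySem.Dict.getD_counter]
      have hti : i = ((i.toNat : Nat) : Int) := by omega
      rw [count_slice p.1 discount i hi0 (by omega), hti]
      rw [show (((i.toNat : Nat) : Int) + 10).toNat = i.toNat + 10 from by omega,
          show (((i.toNat : Nat) : Int)).toNat = i.toNat from by omega,
          show (((i.toNat : Nat) : Int) + 10) = ((i.toNat + 10 : Nat) : Int) from by push_cast; ring]
      rw [decide_eq_decide]
      rw [pyGetD_prefCounts p.1 discount (i.toNat + 10) (by omega),
          pyGetD_prefCounts p.1 discount i.toNat (by omega)]
    rw [hbody]
    cases req.items.all _ <;> simp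

-- ===== VERDICT (by name: the statement is the Claim_ definition above) =====
theorem solution_spec : Claim_equal_solution := by
  intro want number discount _ hpre
  unfold Pre_solution at hpre
  unfold Spec_solution
  exact solution_eq_alt want number discount hpre
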